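-- pv_equiv track=rewrite | github.com/ranceforhiwd/heir-clustering | ml_functions.py | getAllupperwords
-- ===== SOURCE A (Python) =====
-- def getAllupperwords(allCoordinates,yValues):
--     upperwordList = []
--     for i in range(len(yValues)):
--         uppder = yValues[i][5]
--         lower = yValues[i][6]
--         ycoord = yValues[i][2]
--
--
--         for j in range(len(allCoordinates)):
--             ycoordAllwords = allCoordinates[j][2]
--             if allCoordinates[j][2] >= uppder and allCoordinates[j][2] <= ycoord:
--                 upperwordList.append(allCoordinates[j][0])
--     return upperwordList
-- ===== SOURCE B (Python) =====
-- def _lower_bound(ys, x):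
--     # first index k with ys[k] >= x, by binary search on the sorted list ys
--     lo, hi = 0, len(ys)
--     while lo < hi:
--         mid = (lo + hi) // 2
--         if ys[mid] < x:
--             lo = mid + 1
--         else:
--             hi = mid
--     return lo
--
--
-- def _upper_bound(ys, x):
--     # first index k with ys[k] > x, by binary search on the sorted list ys
--     lo, hi = 0, len(ys)
--     while lo < hi:
--         mid = (lo + hi) // 2
--         if ys[mid] <= x:
--             lo = mid + 1
--         else:
--             hi = mid
--     return lo
--
--
-- def getAllupperwords(allCoordinates, yValues):
--     # Sort the coordinates by y once; for each line, binary-search the y-window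
--     # [upper, ycoord], then restore the original word order by sorting the
--     # window slice on the original index.
--     pts = sorted(((y, i, w) for i, (w, _x, y) in enumerate(allCoordinates)),
--                  key=lambda p: p[0])
--     ys = [p[0] for p in pts]
--     out = []
--     for line in yValues:
--         lo = _lower_bound(ys, line[5])
--         hi = _upper_bound(ys, line[2])
--         band = sorted(pts[lo:hi], key=lambda p: p[1])
--         out.extend(p[2] for p in band)
--     return out
-- ===== Notes on version B (the rewrite author's own statement) =====
-- stated objective: alternative
-- what changed: A rescans the whole coordinate list once per line; B sorts the coordinates by y once, binary-searches each line's [upper, ycoord] window in the sorted list, and re-sorts the window slice on the original index to restore A's output order.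
import Mathlib
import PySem

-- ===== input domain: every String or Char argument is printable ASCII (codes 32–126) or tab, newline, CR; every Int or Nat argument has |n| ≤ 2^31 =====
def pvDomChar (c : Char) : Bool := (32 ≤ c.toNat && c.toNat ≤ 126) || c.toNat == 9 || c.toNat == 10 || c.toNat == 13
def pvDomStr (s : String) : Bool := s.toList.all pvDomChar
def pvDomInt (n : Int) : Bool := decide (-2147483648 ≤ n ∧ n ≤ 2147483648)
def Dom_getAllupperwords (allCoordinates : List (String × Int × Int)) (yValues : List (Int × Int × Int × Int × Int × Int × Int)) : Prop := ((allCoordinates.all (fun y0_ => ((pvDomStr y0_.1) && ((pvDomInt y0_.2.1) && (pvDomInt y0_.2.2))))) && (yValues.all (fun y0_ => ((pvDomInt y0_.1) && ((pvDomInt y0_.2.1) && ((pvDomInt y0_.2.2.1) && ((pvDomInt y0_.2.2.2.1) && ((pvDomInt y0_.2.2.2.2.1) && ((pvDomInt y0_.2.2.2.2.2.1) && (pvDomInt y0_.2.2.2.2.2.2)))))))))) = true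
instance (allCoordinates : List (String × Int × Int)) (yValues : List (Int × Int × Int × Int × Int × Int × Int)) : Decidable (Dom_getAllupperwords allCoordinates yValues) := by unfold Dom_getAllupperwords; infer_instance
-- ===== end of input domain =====

-- B replaces A's per-line rescan of all words by a different algorithm: sort the
-- coordinates by y once, binary-search each line's y-window in the sorted list, and
-- re-sort the window slice on the original index to restore A's output order.

-- ===== PORT A =====
def getAllupperwords (allCoordinates : List (String × Int × Int)) (yValues : List (Int × Int × Int × Int × Int × Int × Int)) : List String :=
  (PySem.List.pyRange 0 (PySem.List.len yValues) 1).foldl (fun upperwordList i =>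
    let yv := PySem.List.pyGetD yValues i (0, 0, 0, 0, 0, 0, 0)
    let uppder := yv.2.2.2.2.2.1
    let lower := yv.2.2.2.2.2.2
    let ycoord := yv.2.2.1
    (PySem.List.pyRange 0 (PySem.List.len allCoordinates) 1).foldl (fun acc j =>
      let c := PySem.List.pyGetD allCoordinates j ("", 0, 0)
      let ycoordAllwords := c.2.2
      if c.2.2 ≥ uppder ∧ c.2.2 ≤ ycoord then acc ++ [c.1] else acc) upperwordList) []

-- ===== PORT B =====
-- the 'while lo < hi' loop of Source B's _lower_bound (first index with ys[k] >= x);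
-- the Nat argument is fuel only (the loop runs at most hi - lo ≤ len(ys) times)
def pvLowerLoop (ys : List Int) (x : Int) : Nat → Int → Int → Int
  | 0, lo, _ => lo
  | n + 1, lo, hi =>
    if lo < hi then
      if PySem.List.pyGetD ys (PySem.Int.floordiv (lo + hi) 2) 0 < x then
        pvLowerLoop ys x n (PySem.Int.floordiv (lo + hi) 2 + 1) hi
      else
        pvLowerLoop ys x n lo (PySem.Int.floordiv (lo + hi) 2)
    else lo

def pvLower (ys : List Int) (x : Int) : Int :=
  pvLowerLoop ys x (PySem.List.len ys).toNat 0 (PySem.List.len ys)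

-- the 'while lo < hi' loop of Source B's _upper_bound (first index with ys[k] > x)
def pvUpperLoop (ys : List Int) (x : Int) : Nat → Int → Int → Int
  | 0, lo, _ => lo
  | n + 1, lo, hi =>
    if lo < hi then
      if PySem.List.pyGetD ys (PySem.Int.floordiv (lo + hi) 2) 0 ≤ x then
        pvUpperLoop ys x n (PySem.Int.floordiv (lo + hi) 2 + 1) hi
      else
        pvUpperLoop ys x n lo (PySem.Int.floordiv (lo + hi) 2)
    else lo

def pvUpper (ys : List Int) (x : Int) : Int :=
  pvUpperLoop ys x (PySem.List.len ys).toNat 0 (PySem.List.len ys)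

def getAllupperwords_alt (allCoordinates : List (String × Int × Int)) (yValues : List (Int × Int × Int × Int × Int × Int × Int)) : List String :=
  let pts := PySem.List.sorted
    ((PySem.List.enumerate allCoordinates).map (fun p => (p.2.2.2, p.1, p.2.1)))
    (fun p => p.1) false
  let ys := pts.map (fun p => p.1)
  yValues.foldl (fun out line =>
    let lo := pvLower ys line.2.2.2.2.2.1
    let hi := pvUpper ys line.2.2.1
    let band := PySem.List.sorted (PySem.List.slice pts (some lo) (some hi)) (fun p => p.2.1) false
    out ++ band.map (fun p => p.2.2)) []

-- ===== PRECONDITION & SPEC =====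
def Spec_getAllupperwords (allCoordinates : List (String × Int × Int)) (yValues : List (Int × Int × Int × Int × Int × Int × Int)) (out : List String) : Prop := out = getAllupperwords_alt allCoordinates yValues
instance (allCoordinates : List (String × Int × Int)) (yValues : List (Int × Int × Int × Int × Int × Int × Int)) (out : List String) : Decidable (Spec_getAllupperwords allCoordinates yValues out) := by unfold Spec_getAllupperwords; infer_instance

-- ===== CLAIM (what is proved, stated in full; the proofs are below) =====
def Claim_equal_getAllupperwords : Prop := ∀ (allCoordinates : List (String × Int × Int)) (yValues : List (Int × Int × Int × Int × Int × Int × Int)), Dom_getAllupperwords allCoordinates yValues → Spec_getAllupperwords allCoordinates yValues (getAllupperwords allCoordinates yValues)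


-- ===== LEMMAS AND PROOFS =====

-- binary-search loop spec: with the invariants, pvLowerLoop returns the split point of (· < x)
theorem pvLowerLoop_spec (ys : List Int) (x : Int) (hys : List.Pairwise (· ≤ ·) ys) :
    ∀ (n : Nat) (lo hi : Int), (hi - lo).toNat ≤ n → 0 ≤ lo → lo ≤ hi → hi ≤ ys.length →
    (∀ (k : Nat) (hk : k < ys.length), (k : Int) < lo → ys[k] < x) →
    (∀ (k : Nat) (hk : k < ys.length), hi ≤ (k : Int) → x ≤ ys[k]) →
    0 ≤ pvLowerLoop ys x n lo hi ∧ pvLowerLoop ys x n lo hi ≤ ys.length ∧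
      ∀ (k : Nat) (hk : k < ys.length), ((k : Int) < pvLowerLoop ys x n lo hi ↔ ys[k] < x) := by
  have hmono := List.pairwise_iff_getElem.mp hys
  intro n
  induction n with
  | zero =>
    intro lo hi hn h0 hlh hlen hb ha
    rw [pvLowerLoop]
    refine ⟨h0, by omega, fun k hk => ⟨hb k hk, fun hyk => ?_⟩⟩
    by_contra hc
    have := ha k hk (by omega)
    omega
  | succ n ih =>
    intro lo hi hn h0 hlh hlen hb ha
    rw [pvLowerLoop]
    by_cases h : lo < hi
    · rw [if_pos h]
      have hmb := PySem.Int.floordiv_two_mid_bounds (le_of_lt h)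
      have hmlt : PySem.Int.floordiv (lo + hi) 2 < hi :=
        (PySem.Int.floordiv_lt_iff_lt_mul (by omega)).mpr (by omega)
      have hmn : (PySem.Int.floordiv (lo + hi) 2).toNat < ys.length := by omega
      rw [PySem.List.pyGetD_eq_getElem ys 0 (by omega) (by omega)]
      by_cases hc : ys[(PySem.Int.floordiv (lo + hi) 2).toNat] < x
      · rw [if_pos hc]
        refine ih _ _ (by omega) (by omega) (by omega) hlen (fun k hk hklt => ?_) ha
        rcases Nat.lt_or_ge k (PySem.Int.floordiv (lo + hi) 2).toNat with hlt | hge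
        · exact lt_of_le_of_lt (hmono k _ hk hmn hlt) hc
        · have hke : k = (PySem.Int.floordiv (lo + hi) 2).toNat := by omega
          simp only [hke]; exact hc
      · rw [if_neg hc]
        refine ih _ _ (by omega) h0 (by omega) (by omega) hb (fun k hk hkge => ?_)
        rcases Nat.lt_or_ge (PySem.Int.floordiv (lo + hi) 2).toNat k with hlt | hge
        · exact le_trans (by omega) (hmono _ k hmn hk hlt)
        · have hke : k = (PySem.Int.floordiv (lo + hi) 2).toNat := by omega
          simp only [hke]; omega
    · rw [if_neg h]
      refine ⟨h0, by omega, fun k hk => ⟨hb k hk, fun hyk => ?_⟩⟩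
      by_contra hc
      have := ha k hk (by omega)
      omega

theorem pvUpperLoop_spec (ys : List Int) (x : Int) (hys : List.Pairwise (· ≤ ·) ys) :
    ∀ (n : Nat) (lo hi : Int), (hi - lo).toNat ≤ n → 0 ≤ lo → lo ≤ hi → hi ≤ ys.length →
    (∀ (k : Nat) (hk : k < ys.length), (k : Int) < lo → ys[k] ≤ x) →
    (∀ (k : Nat) (hk : k < ys.length), hi ≤ (k : Int) → x < ys[k]) →
    0 ≤ pvUpperLoop ys x n lo hi ∧ pvUpperLoop ys x n lo hi ≤ ys.length ∧
      ∀ (k : Nat) (hk : k < ys.length), ((k : Int) < pvUpperLoop ys x n lo hi ↔ ys[k] ≤ x) := by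
  have hmono := List.pairwise_iff_getElem.mp hys
  intro n
  induction n with
  | zero =>
    intro lo hi hn h0 hlh hlen hb ha
    rw [pvUpperLoop]
    refine ⟨h0, by omega, fun k hk => ⟨hb k hk, fun hyk => ?_⟩⟩
    by_contra hc
    have := ha k hk (by omega)
    omega
  | succ n ih =>
    intro lo hi hn h0 hlh hlen hb ha
    rw [pvUpperLoop]
    by_cases h : lo < hi
    · rw [if_pos h]
      have hmb := PySem.Int.floordiv_two_mid_bounds (le_of_lt h)
      have hmlt : PySem.Int.floordiv (lo + hi) 2 < hi :=
        (PySem.Int.floordiv_lt_iff_lt_mul (by omega)).mpr (by omega)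
      have hmn : (PySem.Int.floordiv (lo + hi) 2).toNat < ys.length := by omega
      rw [PySem.List.pyGetD_eq_getElem ys 0 (by omega) (by omega)]
      by_cases hc : ys[(PySem.Int.floordiv (lo + hi) 2).toNat] ≤ x
      · rw [if_pos hc]
        refine ih _ _ (by omega) (by omega) (by omega) hlen (fun k hk hklt => ?_) ha
        rcases Nat.lt_or_ge k (PySem.Int.floordiv (lo + hi) 2).toNat with hlt | hge
        · exact le_trans (hmono k _ hk hmn hlt) hc
        · have hke : k = (PySem.Int.floordiv (lo + hi) 2).toNat := by omega
          simp only [hke]; exact hc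
      · rw [if_neg hc]
        refine ih _ _ (by omega) h0 (by omega) (by omega) hb (fun k hk hkge => ?_)
        rcases Nat.lt_or_ge (PySem.Int.floordiv (lo + hi) 2).toNat k with hlt | hge
        · exact lt_of_lt_of_le (by omega) (hmono _ k hmn hk hlt)
        · have hke : k = (PySem.Int.floordiv (lo + hi) 2).toNat := by omega
          simp only [hke]; omega
    · rw [if_neg h]
      refine ⟨h0, by omega, fun k hk => ⟨hb k hk, fun hyk => ?_⟩⟩
      by_contra hc
      have := ha k hk (by omega)
      omega

-- the window slice of a list whose indices split at l (y < a) and r (y ≤ c) is the filter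
theorem pv_slice_filter (pts : List (Int × Int × String)) (a c : Int) (l r : Nat)
    (hl : l ≤ pts.length) (hr : r ≤ pts.length)
    (h1 : ∀ (k : Nat) (hk : k < pts.length), (k < l ↔ pts[k].1 < a))
    (h2 : ∀ (k : Nat) (hk : k < pts.length), (k < r ↔ pts[k].1 ≤ c)) :
    List.take (r - l) (List.drop l pts) = pts.filter (fun p => decide (a ≤ p.1 ∧ p.1 ≤ c)) := by
  by_cases hlr : l ≤ r
  · have hdd : List.drop (r - l) (List.drop l pts) = List.drop r pts := by
      rw [List.drop_drop]; congr 1; omega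
    have hsplit : pts = List.take l pts ++ (List.take (r - l) (List.drop l pts) ++ List.drop r pts) := by
      rw [← hdd, List.take_append_drop, List.take_append_drop]
    have hfa : (List.take l pts).filter (fun p => decide (a ≤ p.1 ∧ p.1 ≤ c)) = [] := by
      rw [List.filter_eq_nil_iff]
      intro z hz
      obtain ⟨k, hk, rfl⟩ := List.mem_iff_getElem.mp hz
      have hkl : k < l := by have := List.length_take (l := pts) (i := l); omega
      have hklen : k < pts.length := by omega
      have := (h1 k hklen).mp hkl
      rw [List.getElem_take]
      simp only [decide_eq_true_eq, not_and]
      intro ha'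
      omega
    have hfc : (List.drop r pts).filter (fun p => decide (a ≤ p.1 ∧ p.1 ≤ c)) = [] := by
      rw [List.filter_eq_nil_iff]
      intro z hz
      obtain ⟨k, hk, rfl⟩ := List.mem_iff_getElem.mp hz
      have hklen : r + k < pts.length := by have := List.length_drop (l := pts) (i := r); omega
      have hnr : ¬ (r + k < r) := by omega
      have := fun h => hnr ((h2 (r + k) hklen).mpr h)
      rw [List.getElem_drop]
      simp only [decide_eq_true_eq, not_and]
      intro _
      exact this
    have hfb : (List.take (r - l) (List.drop l pts)).filter (fun p => decide (a ≤ p.1 ∧ p.1 ≤ c))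
        = List.take (r - l) (List.drop l pts) := by
      rw [List.filter_eq_self]
      intro z hz
      obtain ⟨k, hk, rfl⟩ := List.mem_iff_getElem.mp hz
      have hlens : k < r - l ∧ k < pts.length - l := by
        have h3 := List.length_take (l := List.drop l pts) (i := r - l)
        have h4 := List.length_drop (l := pts) (i := l)
        omega
      have hklen : l + k < pts.length := by omega
      have hge : ¬ (l + k < l) := by omega
      have hA : ¬ (pts[l + k].1 < a) := fun h => hge ((h1 (l + k) hklen).mpr h)
      have hC : pts[l + k].1 ≤ c := (h2 (l + k) hklen).mp (by omega)
      rw [List.getElem_take, List.getElem_drop]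
      simp only [decide_eq_true_eq]
      exact ⟨by omega, hC⟩
    conv_rhs => rw [hsplit]
    rw [List.filter_append, List.filter_append, hfa, hfb, hfc]
    simp
  · have hz : r - l = 0 := by omega
    rw [hz, List.take_zero]
    symm
    rw [List.filter_eq_nil_iff]
    intro z hz'
    obtain ⟨k, hk, rfl⟩ := List.mem_iff_getElem.mp hz'
    simp only [decide_eq_true_eq, not_and]
    intro ha' hc'
    have hkr : k < r := (h2 k hk).mpr hc'
    have : pts[k].1 < a := (h1 k hk).mp (by omega)
    omega

-- mapping the word out of the filtered enumerated triples = filtering the original list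
theorem pv_zz_map (cs : List (String × Int × Int)) (a c : Int) : ∀ (s : Int),
    ((((PySem.List.enumerate cs s).map (fun p => (p.2.2.2, p.1, p.2.1))).filter
        (fun p => decide (a ≤ p.1 ∧ p.1 ≤ c))).map (fun p => p.2.2))
      = (cs.filter (fun t => decide (a ≤ t.2.2 ∧ t.2.2 ≤ c))).map (fun t => t.1) := by
  induction cs with
  | nil => intro s; simp [PySem.List.enumerate_nil]
  | cons t cs ih =>
    intro s
    rw [PySem.List.enumerate_cons]
    simp only [List.map_cons, List.filter_cons]
    by_cases hc : a ≤ t.2.2 ∧ t.2.2 ≤ c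
    · have h' := ih (s + 1)
      simp at h' ⊢
      simp [hc, h']
    · have h' := ih (s + 1)
      simp at h' ⊢
      simp [hc, h']

-- one line's band, in closed form
theorem pv_band_eq (cs : List (String × Int × Int)) (a c : Int) :
    ((PySem.List.sorted
        (PySem.List.slice
          (PySem.List.sorted ((PySem.List.enumerate cs).map (fun p => (p.2.2.2, p.1, p.2.1))) (fun p => p.1) false)
          (some (pvLower ((PySem.List.sorted ((PySem.List.enumerate cs).map (fun p => (p.2.2.2, p.1, p.2.1))) (fun p => p.1) false).map (fun p => p.1)) a))
          (some (pvUpper ((PySem.List.sorted ((PySem.List.enumerate cs).map (fun p => (p.2.2.2, p.1, p.2.1))) (fun p => p.1) false).map (fun p => p.1)) c)))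
        (fun p => p.2.1) false).map (fun p => p.2.2))
      = (cs.filter (fun t => decide (a ≤ t.2.2 ∧ t.2.2 ≤ c))).map (fun t => t.1) := by
  set zz := (PySem.List.enumerate cs).map (fun p => (p.2.2.2, p.1, p.2.1)) with hzz
  set pts := PySem.List.sorted zz (fun p => p.1) false with hpts
  set Y := pts.map (fun p => p.1) with hY
  have hYlen : Y.length = pts.length := by rw [hY, List.length_map]
  have hpair : List.Pairwise (· ≤ ·) Y := by
    rw [hY]
    exact (List.pairwise_map).mpr (PySem.List.sorted_pairwise zz (fun p => p.1))
  have hYget : ∀ (k : Nat) (hk : k < Y.length), Y[k] = pts[k].1 := by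
    intro k hk
    simp [hY]
  have hlenY : PySem.List.len Y = (Y.length : Int) := PySem.List.len_eq Y
  obtain ⟨hlo0, hloLen, hloChar⟩ :=
    pvLowerLoop_spec Y a hpair (PySem.List.len Y).toNat 0 (PySem.List.len Y)
      (by rw [hlenY]; omega)
      (by omega) (by rw [hlenY]; omega) (by rw [hlenY])
      (fun k hk h => absurd h (by omega))
      (fun k hk h => absurd h (by rw [hlenY] at h; omega))
  obtain ⟨hhi0, hhiLen, hhiChar⟩ :=
    pvUpperLoop_spec Y c hpair (PySem.List.len Y).toNat 0 (PySem.List.len Y)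
      (by rw [hlenY]; omega)
      (by omega) (by rw [hlenY]; omega) (by rw [hlenY])
      (fun k hk h => absurd h (by omega))
      (fun k hk h => absurd h (by rw [hlenY] at h; omega))
  rw [pvLower, pvUpper] at *
  rw [PySem.List.slice_toNat pts hlo0 hhi0]
  rw [pv_slice_filter pts a c _ _ (by omega) (by omega)
      (fun k hk => by
        rw [← hYget k (by omega)]
        constructor
        · intro h; exact (hloChar k (by omega)).mp (by omega)
        · intro h; have := (hloChar k (by omega)).mpr h; omega)
      (fun k hk => by
        rw [← hYget k (by omega)]
        constructor
        · intro h; exact (hhiChar k (by omega)).mp (by omega)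
        · intro h; have := (hhiChar k (by omega)).mpr h; omega)]
  have hperm : (zz.filter (fun p => decide (a ≤ p.1 ∧ p.1 ≤ c))).Perm
      (pts.filter (fun p => decide (a ≤ p.1 ∧ p.1 ≤ c))) :=
    (List.Perm.filter _ (PySem.List.sorted_perm zz (fun p => p.1) false)).symm
  have hpw : (zz.filter (fun p => decide (a ≤ p.1 ∧ p.1 ≤ c))).Pairwise (fun p q => p.2.1 < q.2.1) := by
    apply List.Pairwise.filter
    rw [hzz]
    exact (List.pairwise_map).mpr (PySem.List.pairwise_lt_enumerate cs 0)
  rw [PySem.List.sorted_eq_of_perm_of_pairwise_lt _ _ (fun p => p.2.1) hperm hpw]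
  exact pv_zz_map cs a c 0

-- B in closed form
theorem pv_alt_eq (cs : List (String × Int × Int)) (ys : List (Int × Int × Int × Int × Int × Int × Int)) :
    getAllupperwords_alt cs ys
      = ys.flatMap (fun q => (cs.filter (fun c => decide (q.2.2.2.2.2.1 ≤ c.2.2 ∧ c.2.2 ≤ q.2.2.1))).map (·.1)) := by
  simp only [getAllupperwords_alt]
  rw [PySem.List.foldl_append_eq_flatMap]
  rw [List.nil_append]
  exact List.flatMap_congr (fun q _ => pv_band_eq cs q.2.2.2.2.2.1 q.2.2.1)

-- A in the same closed form
theorem pv_a_eq (cs : List (String × Int × Int)) (ys : List (Int × Int × Int × Int × Int × Int × Int)) :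
    getAllupperwords cs ys
      = ys.flatMap (fun q => (cs.filter (fun c => decide (q.2.2.2.2.2.1 ≤ c.2.2 ∧ c.2.2 ≤ q.2.2.1))).map (·.1)) := by
  unfold getAllupperwords
  rw [PySem.List.foldl_pyRange_zero_pyGetD ys (0, 0, 0, 0, 0, 0, 0)
      (fun upperwordList yv =>
        (PySem.List.pyRange 0 (PySem.List.len cs) 1).foldl (fun acc j =>
          let c := PySem.List.pyGetD cs j ("", 0, 0)
          if c.2.2 ≥ yv.2.2.2.2.2.1 ∧ c.2.2 ≤ yv.2.2.1 then acc ++ [c.1] else acc) upperwordList) []]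
  have hinner : ∀ (acc : List String) (yv : Int × Int × Int × Int × Int × Int × Int),
      (PySem.List.pyRange 0 (PySem.List.len cs) 1).foldl (fun acc j =>
        let c := PySem.List.pyGetD cs j ("", 0, 0)
        if c.2.2 ≥ yv.2.2.2.2.2.1 ∧ c.2.2 ≤ yv.2.2.1 then acc ++ [c.1] else acc) acc
      = acc ++ (cs.filter (fun c => decide (yv.2.2.2.2.2.1 ≤ c.2.2 ∧ c.2.2 ≤ yv.2.2.1))).map (·.1) := by
    intro acc yv
    rw [PySem.List.foldl_pyRange_zero_pyGetD cs ("", 0, 0)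
        (fun acc c => if c.2.2 ≥ yv.2.2.2.2.2.1 ∧ c.2.2 ≤ yv.2.2.1 then acc ++ [c.1] else acc) acc]
    rw [PySem.List.foldl_ite_eq_foldl_filter
        (fun c => c.2.2 ≥ yv.2.2.2.2.2.1 ∧ c.2.2 ≤ yv.2.2.1) (fun acc c => acc ++ [c.1]) cs acc]
    rw [PySem.List.foldl_append_singleton_eq_map]
  simp only [hinner]
  rw [PySem.List.foldl_append_eq_flatMap]
  simp

-- ===== VERDICT (by name: the statement is the Claim_ definition above) =====
theorem getAllupperwords_spec : Claim_equal_getAllupperwords := by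
  intro cs ys _
  unfold Spec_getAllupperwords
  rw [pv_a_eq, pv_alt_eq]
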